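-- pv_equiv track=rewrite | github.com/wilsjame/adventofcode | 2021/day18.py | findpr
-- ===== SOURCE A (Python) =====
-- def nestdepth(a: list[str], ptr: int) -> int:
--     """returns the nested depth of a pair at ptr"""
--     cnt = 0
--     for i in range(ptr, -1, -1):
--         cnt += a[i] == '['
--         cnt -= a[i] == ']'
--     return cnt - 1
--
-- def findpr(a: list[str], anydepth: bool = False) -> int:
--     """returns '[' ptr of a pair at any depth or nested depth >= 4"""
--     for i in range(len(a) - 3):
--         if a[i].isdigit() and a[i+1] == ',' and a[i+2].isdigit():
--             if anydepth == True:
--                 return i - 1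
--             elif nestdepth(a, i) >= 4:
--                 return i - 1
--     return -1
-- ===== SOURCE B (Python) =====
-- def findpr(a, anydepth=False):
--     """returns '[' ptr of a pair at any depth or nested depth >= 4"""
--     depth = 0
--     for i in range(len(a) - 3):
--         t = a[i]
--         if t.isdigit() and a[i + 1] == ',' and a[i + 2].isdigit() and (anydepth or depth >= 5):
--             return i - 1
--         depth += (t == '[') - (t == ']')
--     return -1
-- ===== Notes on version B (the rewrite author's own statement) =====
-- stated objective: alternative
-- what changed: B replaces A's per-candidate rescan of the whole prefix (nestdepth) by a single left-to-right pass that maintains the running bracket depth as loop state, so the inner scan disappears.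
import Mathlib
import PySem

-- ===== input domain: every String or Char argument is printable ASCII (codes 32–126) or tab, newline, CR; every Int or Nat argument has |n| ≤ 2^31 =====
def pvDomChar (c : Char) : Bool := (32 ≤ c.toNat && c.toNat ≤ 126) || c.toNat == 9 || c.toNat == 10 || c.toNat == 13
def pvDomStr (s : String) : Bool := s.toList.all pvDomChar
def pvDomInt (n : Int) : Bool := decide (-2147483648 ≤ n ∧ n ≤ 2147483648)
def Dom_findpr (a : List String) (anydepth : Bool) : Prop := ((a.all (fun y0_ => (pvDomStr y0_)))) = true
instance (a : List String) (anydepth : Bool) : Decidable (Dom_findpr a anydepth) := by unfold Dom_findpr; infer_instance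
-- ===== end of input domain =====

-- B maintains the running bracket depth in one pass instead of rescanning the prefix
-- for every candidate (A's nestdepth); objective: alternative single-pass algorithm.

-- ===== PORT A =====
-- nestdepth: Python's inner countdown loop; indices i run over 0..ptr and are in range
-- whenever findpr calls it (0 ≤ ptr < len a), so pyGetD with default "" is exact there.
def nestdepth (a : List String) (ptr : Int) : Int :=
  ((PySem.List.pyRange ptr (-1) (-1)).foldl
    (fun cnt i =>
      (cnt + (if PySem.List.pyGetD a i "" == "[" then 1 else 0))
        - (if PySem.List.pyGetD a i "" == "]" then 1 else 0)) 0) - 1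

-- the for-loop of A with its early returns, as recursion over the index list
def findprGo (a : List String) (anydepth : Bool) : List Int → Int
  | [] => -1
  | i :: rest =>
    if PySem.Str.strIsdigit (PySem.List.pyGetD a i "")
        && (PySem.List.pyGetD a (i + 1) "" == ",")
        && PySem.Str.strIsdigit (PySem.List.pyGetD a (i + 2) "") then
      if anydepth then i - 1
      else if 4 ≤ nestdepth a i then i - 1
      else findprGo a anydepth rest
    else findprGo a anydepth rest

def findpr (a : List String) (anydepth : Bool) : Int :=
  findprGo a anydepth (PySem.List.pyRange 0 ((a.length : Int) - 3) 1)

-- ===== PORT B =====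
-- the single pass of B: the loop carries the running bracket depth of the prefix
def findprAltGo (a : List String) (anydepth : Bool) : Int → List Int → Int
  | _, [] => -1
  | depth, i :: rest =>
    let t := PySem.List.pyGetD a i ""
    if PySem.Str.strIsdigit t
        && (PySem.List.pyGetD a (i + 1) "" == ",")
        && PySem.Str.strIsdigit (PySem.List.pyGetD a (i + 2) "")
        && (anydepth || decide (5 ≤ depth)) then i - 1
    else
      findprAltGo a anydepth
        (depth + ((if t == "[" then 1 else 0) - (if t == "]" then 1 else 0))) rest

def findpr_alt (a : List String) (anydepth : Bool) : Int :=
  findprAltGo a anydepth 0 (PySem.List.pyRange 0 ((a.length : Int) - 3) 1)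

-- ===== PRECONDITION & SPEC =====
def Spec_findpr (a : List String) (anydepth : Bool) (out : Int) : Prop := out = findpr_alt a anydepth
instance (a : List String) (anydepth : Bool) (out : Int) : Decidable (Spec_findpr a anydepth out) := by unfold Spec_findpr; infer_instance

-- ===== CLAIM (what is proved, stated in full; the proofs are below) =====
def Claim_equal_findpr : Prop := ∀ (a : List String) (anydepth : Bool), Dom_findpr a anydepth → Spec_findpr a anydepth (findpr a anydepth)

-- ===== LEMMAS AND PROOFS =====

-- bracket contribution of one token
def pvInd (t : String) : Int := (if t == "[" then 1 else 0) - (if t == "]" then 1 else 0)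

-- running bracket depth of the first k tokens
def pvPd (a : List String) (k : Nat) : Int := ((a.take k).map pvInd).sum

theorem pvPd_succ (a : List String) (k : Nat) (hk : k < a.length) :
    pvPd a (k + 1) = pvPd a k + pvInd (a.getD k "") := by
  unfold pvPd
  rw [List.take_add_one, List.getElem?_eq_getElem hk]
  simp only [Option.toList_some, List.map_append, List.sum_append, List.map_cons, List.map_nil,
    List.sum_cons, List.sum_nil, add_zero]
  rw [List.getD_eq_getElem a "" hk]

theorem pvInd_of_isdigit (t : String) (h : PySem.Str.strIsdigit t = true) : pvInd t = 0 := by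
  have h1 : t ≠ "[" := by rintro rfl; simp [PySem.Str.strIsdigit] at h; revert h; decide
  have h2 : t ≠ "]" := by rintro rfl; simp [PySem.Str.strIsdigit] at h; revert h; decide
  simp [pvInd, h1, h2]

-- nestdepth's fold shifts its initial accumulator out
theorem pvFold_shift (a : List String) (l : List Int) (init : Int) :
    l.foldl (fun cnt i =>
      (cnt + (if PySem.List.pyGetD a i "" == "[" then 1 else 0))
        - (if PySem.List.pyGetD a i "" == "]" then 1 else 0)) init
      = init + l.foldl (fun cnt i =>
      (cnt + (if PySem.List.pyGetD a i "" == "[" then 1 else 0))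
        - (if PySem.List.pyGetD a i "" == "]" then 1 else 0)) 0 := by
  induction l generalizing init with
  | nil => simp
  | cons x xs ih =>
    simp only [List.foldl_cons]
    rw [ih, ih ((0 + _) - _)]
    ring

theorem pvNestdepth_eq (a : List String) (k : Nat) (hk : k < a.length) :
    nestdepth a (k : Int) = pvPd a (k + 1) - 1 := by
  induction k with
  | zero =>
    rw [nestdepth, PySem.List.pyRange_neg_one_cons (by norm_num)]
    rw [PySem.List.pyRange_neg_one_eq_nil (by norm_num)]
    rw [pvPd_succ a 0 hk]
    have h0 : PySem.List.pyGetD a (0 : Int) "" = a.getD 0 "" := by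
      simpa using PySem.List.pyGetD_natCast a 0 ""
    simp only [List.foldl_cons, List.foldl_nil]
    simp [pvPd, pvInd, h0, List.getD]
  | succ k ih =>
    have hk' : k < a.length := Nat.lt_of_succ_lt hk
    rw [nestdepth, PySem.List.pyRange_neg_one_cons (by exact_mod_cast Int.lt_of_lt_of_le (by norm_num) (Int.natCast_nonneg (k+1)))]
    rw [List.foldl_cons, pvFold_shift]
    have hcast : ((k : Int) + 1) - 1 = (k : Int) := by ring
    have hget : PySem.List.pyGetD a ((k + 1 : Nat) : Int) "" = a.getD (k + 1) "" :=
      PySem.List.pyGetD_natCast a (k + 1) ""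
    have hrest := ih hk'
    rw [nestdepth] at hrest
    push_cast
    rw [hcast]
    have : ((PySem.List.pyRange (k : Int) (-1) (-1)).foldl
        (fun cnt i =>
          (cnt + (if PySem.List.pyGetD a i "" == "[" then 1 else 0))
            - (if PySem.List.pyGetD a i "" == "]" then 1 else 0)) 0) = pvPd a (k + 1) - 1 + 1 := by
      omega
    rw [this, pvPd_succ a (k + 1) hk]
    push_cast at hget
    simp [pvInd, hget]
    ring

theorem pvLoop_eq (a : List String) (ad : Bool) :
    ∀ (m k : Nat), (((a.length : Int) - 3) - (k : Int)).toNat = m →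
      findprGo a ad (PySem.List.pyRange (k : Int) ((a.length : Int) - 3) 1)
        = findprAltGo a ad (pvPd a k) (PySem.List.pyRange (k : Int) ((a.length : Int) - 3) 1) := by
  intro m
  induction m with
  | zero =>
    intro k hm
    rw [PySem.List.pyRange_one_eq_nil (by omega)]
    rfl
  | succ m ih =>
    intro k hm
    have hlt : (k : Int) < (a.length : Int) - 3 := by omega
    have hklen : k < a.length := by omega
    rw [PySem.List.pyRange_one_cons hlt]
    have hget : PySem.List.pyGetD a (k : Int) "" = a[k]?.getD "" := by
      simp [PySem.List.pyGetD_natCast a k "", List.getD]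
    have hcast1 : (k : Int) + 1 = ((k + 1 : Nat) : Int) := by push_cast; ring
    have ihk := ih (k + 1) (by omega)
    rw [← hcast1] at ihk
    have hAget : a.getD k "" = a[k]?.getD "" := by simp [List.getD]
    by_cases hd : (PySem.Str.strIsdigit (PySem.List.pyGetD a (k : Int) "")
        && (PySem.List.pyGetD a ((k : Int) + 1) "" == ",")
        && PySem.Str.strIsdigit (PySem.List.pyGetD a ((k : Int) + 2) "")) = true
    · obtain ⟨⟨h1, h2⟩, h3⟩ : ((PySem.Chars.strIsdigit ((a[k]?.getD "").toList) = true
          ∧ PySem.List.pyGetD a ((k : Int) + 1) "" = ",")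
          ∧ PySem.Chars.strIsdigit ((PySem.List.pyGetD a ((k : Int) + 2) "").toList) = true) := by
        simpa [hget] using hd
      have hdig : PySem.Str.strIsdigit (a.getD k "") = true := by
        rw [hAget]; simpa using h1
      have hind0 : pvInd (a.getD k "") = 0 := pvInd_of_isdigit _ hdig
      have hind : ((if a[k]?.getD "" = "[" then (1 : Int) else 0)
          - if a[k]?.getD "" = "]" then 1 else 0) = 0 := by
        rw [← hAget]; simpa [pvInd] using hind0
      have hpd : pvPd a (k + 1) = pvPd a k := by
        rw [pvPd_succ a k hklen, hind0]; ring
      cases ad with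
      | true =>
        simp only [findprGo, findprAltGo]
        simp [hget, h1, h2, h3]
      | false =>
        have hnd : nestdepth a (k : Int) = pvPd a k - 1 := by
          rw [pvNestdepth_eq a k hklen, hpd]
        by_cases h5 : (5 : Int) ≤ pvPd a k
        · have h4 : (4 : Int) ≤ nestdepth a (k : Int) := by omega
          simp only [findprGo, findprAltGo]
          simp [hget, h1, h2, h3, h4, h5]
        · have h4 : ¬ (4 : Int) ≤ nestdepth a (k : Int) := by omega
          simp only [findprGo, findprAltGo]
          simp [hget, h1, h2, h3, h4, h5, hind]
          rw [ihk, hpd]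
    · have h' : ¬ ((PySem.Chars.strIsdigit ((a[k]?.getD "").toList) = true
          ∧ PySem.List.pyGetD a ((k : Int) + 1) "" = ",")
          ∧ PySem.Chars.strIsdigit ((PySem.List.pyGetD a ((k : Int) + 2) "").toList) = true) := by
        intro h; exact hd (by simpa [hget] using h)
      simp only [findprGo, findprAltGo]
      simp [hget, h']
      rw [ihk, pvPd_succ a k hklen]
      congr 1
      simp [pvInd]

-- ===== VERDICT (by name: the statement is the Claim_ definition above) =====
theorem findpr_spec : Claim_equal_findpr := by
  intro a ad _
  unfold Spec_findpr findpr findpr_alt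
  have := pvLoop_eq a ad (((a.length : Int) - 3) - 0).toNat 0 rfl
  simpa [pvPd] using this
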